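-- pv_equiv track=rewrite | github.com/Sohaib-Ahmed869/HFS-WS | scraper/menu.py | parse_element_text_simple
-- ===== SOURCE A (Python) =====
-- def parse_element_text_simple(element_text):
--     """
--     SIMPLIFIED: Better text parsing for restaurants without price checks
--     """
--     try:
--         lines = [line.strip() for line in element_text.split('\n') if line.strip()]
--
--         if len(lines) < 1:
--             return "", ""
--
--         # First non-UI line is usually the title
--         title = ""
--         description = ""
--
--         for line in lines:
--             if len(line) > 2 and not is_ui_text_simple(line):
--                 if not title:
--                     title = line
--                 elif not description and len(line) > 10:
--                     description = line
--                     break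
--
--         return title, description
--
--     except:
--         return "", ""
--
-- def is_ui_text_simple(text):
--     """
--     ENHANCED: Better UI text detection
--     """
--     if not text:
--         return False
--
--     text_lower = text.lower().strip()
--
--     # Common UI elements
--     ui_patterns = [
--         'ajouter', 'add', 'commander', 'order', 'voir plus', 'show more',
--         'disponible', 'available', 'en stock', 'in stock', 'select',
--         'choisir', 'options', 'quantity', 'quantité', 'personnaliser',
--         'customize', 'modify', 'modifier', 'delete', 'supprimer',
--         'click here', 'cliquez ici', 'buy now', 'acheter maintenant',
--         'add to cart', 'ajouter au panier', 'livraison', 'delivery',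
--         'retrait', 'pickup', 'commander maintenant', 'order now',
--         'menu', 'accueil', 'home', 'contact', 'about', 'login',
--         'connexion', 'inscription', 'register', 'sign up'
--     ]
--
--     # Check if text is exactly a UI element
--     if text_lower in ui_patterns:
--         return True
--
--     # Check if text contains UI elements (for short texts)
--     if len(text) < 30:
--         return any(ui_word in text_lower for ui_word in ui_patterns)
--
--     return False
-- ===== SOURCE B (Python) =====
-- def parse_element_text_simple(element_text):
--     """Reverse single-pass fold: walk the lines back-to-front keeping (title,
--     description) for the suffix seen so far; a new valid line becomes the title
--     and the previous title is demoted to description if it is long enough."""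
--     try:
--         title, description = "", ""
--         for raw in reversed(element_text.split('\n')):
--             line = raw.strip()
--             if len(line) > 2 and not is_ui_text_simple(line):
--                 description = title if len(title) > 10 else description
--                 title = line
--         return title, description
--     except:
--         return "", ""
--
-- def is_ui_text_simple(text):
--     if not text:
--         return False
--     text_lower = text.lower().strip()
--     ui_patterns = [
--         'ajouter', 'add', 'commander', 'order', 'voir plus', 'show more',
--         'disponible', 'available', 'en stock', 'in stock', 'select',
--         'choisir', 'options', 'quantity', 'quantité', 'personnaliser',
--         'customize', 'modify', 'modifier', 'delete', 'supprimer',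
--         'click here', 'cliquez ici', 'buy now', 'acheter maintenant',
--         'add to cart', 'ajouter au panier', 'livraison', 'delivery',
--         'retrait', 'pickup', 'commander maintenant', 'order now',
--         'menu', 'accueil', 'home', 'contact', 'about', 'login',
--         'connexion', 'inscription', 'register', 'sign up'
--     ]
--     if text_lower in ui_patterns:
--         return True
--     if len(text) < 30:
--         return any(ui_word in text_lower for ui_word in ui_patterns)
--     return False
-- ===== Notes on version B (the rewrite author's own statement) =====
-- stated objective: alternative
-- what changed: Replaced A's forward state machine (title/description flags with an early break) by a single reverse fold: lines are scanned back-to-front and each valid line becomes the new title while the previous title is demoted to description when longer than 10.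
import Mathlib
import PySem

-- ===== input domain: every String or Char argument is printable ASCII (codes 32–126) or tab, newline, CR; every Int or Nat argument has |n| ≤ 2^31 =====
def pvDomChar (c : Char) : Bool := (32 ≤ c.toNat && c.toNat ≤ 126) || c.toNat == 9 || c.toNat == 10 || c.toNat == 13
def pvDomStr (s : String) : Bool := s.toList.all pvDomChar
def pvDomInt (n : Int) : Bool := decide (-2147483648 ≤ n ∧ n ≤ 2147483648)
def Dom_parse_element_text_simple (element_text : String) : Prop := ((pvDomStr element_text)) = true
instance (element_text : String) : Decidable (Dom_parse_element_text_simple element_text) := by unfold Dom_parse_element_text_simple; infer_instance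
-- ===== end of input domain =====

-- B replaces A's forward title/description flag loop with a break by one reverse fold
-- that demotes the previous title to description; objective: alternative decomposition.

-- ===== PORT A =====
-- shared module helper: is_ui_text_simple (used by both Pythons unchanged)
def uiPatterns : List String :=
  ["ajouter", "add", "commander", "order", "voir plus", "show more",
   "disponible", "available", "en stock", "in stock", "select",
   "choisir", "options", "quantity", "quantité", "personnaliser",
   "customize", "modify", "modifier", "delete", "supprimer",
   "click here", "cliquez ici", "buy now", "acheter maintenant",
   "add to cart", "ajouter au panier", "livraison", "delivery",
   "retrait", "pickup", "commander maintenant", "order now",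
   "menu", "accueil", "home", "contact", "about", "login",
   "connexion", "inscription", "register", "sign up"]

def is_ui_text_simple (text : String) : Bool :=
  if text == "" then false
  else
    let text_lower := PySem.Str.strip (PySem.Str.lower text)
    if uiPatterns.contains text_lower then true
    else if PySem.Str.len text < 30 then
      uiPatterns.any (fun ui_word => PySem.Str.isIn ui_word text_lower)
    else false

-- the 'for line in lines' loop of A, with its title/description state and break
def parseLoopA : List String → String → String → String × String
  | [], title, description => (title, description)
  | line :: rest, title, description =>
    if PySem.Str.len line > 2 && !is_ui_text_simple line then
      if title == "" then parseLoopA rest line description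
      else if description == "" && PySem.Str.len line > 10 then (title, line)  -- break
      else parseLoopA rest title description
    else parseLoopA rest title description

def parse_element_text_simple (element_text : String) : String × String :=
  let lines := (((PySem.Str.split? element_text "\n").getD []).map PySem.Str.strip).filter
                  (fun line => line ≠ "")
  if lines.length < 1 then ("", "")
  else parseLoopA lines "" ""

-- ===== PORT B =====
-- the body of B's reverse loop: strip the raw line; a valid line becomes the title,
-- demoting the old title to description when it is longer than 10
def stepB (acc : String × String) (raw : String) : String × String :=
  let line := PySem.Str.strip raw
  if PySem.Str.len line > 2 && !is_ui_text_simple line then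
    (line, if PySem.Str.len acc.1 > 10 then acc.1 else acc.2)
  else acc

def parse_element_text_simple_alt (element_text : String) : String × String :=
  (((PySem.Str.split? element_text "\n").getD []).reverse).foldl stepB ("", "")

-- ===== PRECONDITION & SPEC =====
def Spec_parse_element_text_simple (element_text : String) (out : String × String) : Prop := out = parse_element_text_simple_alt element_text
instance (element_text : String) (out : String × String) : Decidable (Spec_parse_element_text_simple element_text out) := by unfold Spec_parse_element_text_simple; infer_instance

-- ===== CLAIM (what is proved, stated in full; the proofs are below) =====
def Claim_equal_parse_element_text_simple : Prop := ∀ (element_text : String), Dom_parse_element_text_simple element_text → Spec_parse_element_text_simple element_text (parse_element_text_simple element_text)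

-- ===== LEMMAS AND PROOFS =====

-- abbreviation for 'candidate line' used only in the proofs
def isCand (l : String) : Bool := PySem.Str.len l > 2 && !is_ui_text_simple l

-- common characterisation both ports are reduced to: head of the candidate list,
-- paired with its first long successor
def pickSpec : List String → String × String
  | [] => ("", "")
  | t :: r => (t, ((r.find? (fun c => PySem.Str.len c > 10)).getD ""))

theorem isCand_eq (l : String) :
    (PySem.Str.len l > 2 && !is_ui_text_simple l) = isCand l := rfl

theorem isCand_empty : isCand "" = false := by
  simp [isCand, PySem.Str.len]

theorem cand_ne_empty {l : String} (h : isCand l = true) : (l == "") = false := by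
  rw [Bool.eq_false_iff]
  intro hb
  have hl : l = "" := by simpa using hb
  subst hl
  rw [isCand_empty] at h
  exact Bool.false_ne_true h

-- after the title is set (nonempty), A's loop returns the title paired with the first
-- long candidate of the remainder
theorem parseLoopA_titled (xs : List String) (t : String) (ht : (t == "") = false) :
    parseLoopA xs t "" =
      (t, (((xs.filter isCand).find? (fun c => PySem.Str.len c > 10)).getD "")) := by
  induction xs with
  | nil => simp [parseLoopA]
  | cons l rest ih =>
    rw [parseLoopA, isCand_eq]
    by_cases hc : isCand l = true
    · rw [if_pos hc, if_neg (by simp [ht]), List.filter_cons_of_pos hc]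
      by_cases hq : 10 < l.length
      · rw [if_pos (by simp [hq])]
        simp [hq]
      · rw [if_neg (by simp [hq])]
        simpa [List.find?_cons, hq] using ih
    · rw [if_neg hc, List.filter_cons_of_neg (by simpa using hc)]
      exact ih

-- A's loop from the initial state computes pickSpec of the candidates
theorem parseLoopA_start (xs : List String) :
    parseLoopA xs "" "" = pickSpec (xs.filter isCand) := by
  induction xs with
  | nil => simp [parseLoopA, pickSpec]
  | cons l rest ih =>
    rw [parseLoopA, isCand_eq]
    by_cases hc : isCand l = true
    · rw [if_pos hc, if_pos (show (("" : String) == "") = true from rfl),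
          List.filter_cons_of_pos hc]
      exact parseLoopA_titled rest l (cand_ne_empty hc)
    · rw [if_neg hc, List.filter_cons_of_neg (by simpa using hc)]
      exact ih

-- A filters out empty lines first; the candidate filter subsumes that
theorem filter_candidates (ls : List String) :
    (ls.filter (fun line => line ≠ "")).filter isCand = ls.filter isCand := by
  rw [List.filter_filter]
  congr 1
  funext a
  by_cases h : a = ""
  · subst h; simp [isCand_empty]
  · simp [h]

-- B's reverse fold also computes pickSpec of the candidates (after stripping)
theorem foldB_spec (ls : List String) :
    ls.reverse.foldl stepB ("", "") = pickSpec ((ls.map PySem.Str.strip).filter isCand) := by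
  rw [List.foldl_reverse]
  induction ls with
  | nil => rfl
  | cons l rest ih =>
    rw [List.foldr_cons, ih, List.map_cons]
    show stepB _ l = _
    simp only [stepB, isCand_eq]
    by_cases hc : isCand (PySem.Str.strip l) = true
    · rw [if_pos hc, List.filter_cons_of_pos hc]
      cases hrest : (rest.map PySem.Str.strip).filter isCand with
      | nil => simp [pickSpec, PySem.Str.len]
      | cons t r =>
        by_cases hq : 10 < t.length
        · simp [pickSpec, hq]
        · simp [pickSpec, hq]
    · rw [if_neg hc, List.filter_cons_of_neg (by simpa using hc)]

-- ===== VERDICT (by name: the statement is the Claim_ definition above) =====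
theorem parse_element_text_simple_spec : Claim_equal_parse_element_text_simple := by
  intro s _
  unfold Spec_parse_element_text_simple parse_element_text_simple parse_element_text_simple_alt
  rw [foldB_spec]
  by_cases hemp :
      (((PySem.Str.split? s "\n").getD []).map PySem.Str.strip).filter
        (fun line => line ≠ "") = []
  · rw [if_pos (by rw [hemp]; simp)]
    have h0 : (((PySem.Str.split? s "\n").getD []).map PySem.Str.strip).filter isCand = [] := by
      rw [← filter_candidates, hemp]; rfl
    rw [h0]; rfl
  · rw [if_neg (by intro h; exact hemp (List.length_eq_zero_iff.mp (Nat.lt_one_iff.mp h))),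
        parseLoopA_start, filter_candidates]
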